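-- pv_equiv track=rewrite | github.com/3mi1y/Markov_Trump_Tweets | server/data/dataParser.py | generateSecondOrderMarkov
-- ===== SOURCE A (Python) =====
-- def generateSecondOrderMarkov(cleanData):
--     markov_model = {} # <-- this will be a nested dicitonary
--     for line in cleanData:
--         for i in range(0, len(line) - 1):
--             # first, check and see if the unique word has already been added to our model
--             if(line[i] in markov_model):
--                 #now, check to see if the next word has already been recorded in transition words
--                 if(line[i+1] in markov_model[line[i]]):
--                     markov_model[line[i]][line[i+1]] += 1
--                 else:
--                     markov_model[line[i]][line[i+1]] = 1
--             else:
--                 markov_model[line[i]] = {}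
--                 markov_model[line[i]][line[i+1]] = 1
--     return markov_model
-- ===== SOURCE B (Python) =====
-- def generateSecondOrderMarkov(cleanData):
--     # Declarative build: flatten to one list of adjacent pairs, then construct the
--     # nested dict by comprehension, counting each pair's occurrences with list.count.
--     pairs = [p for line in cleanData for p in zip(line, line[1:])]
--     return {
--         a: {b: pairs.count((a, b))
--             for b in dict.fromkeys(y for x, y in pairs if x == a)}
--         for a in dict.fromkeys(x for x, _ in pairs)
--     }
-- ===== Notes on version B (the rewrite author's own statement) =====
-- stated objective: alternative
-- what changed: Replaces A's single-pass incremental mutation of a nested dict with a declarative two-level comprehension: flatten everything to one adjacent-pair list, dedup first words and their successors with dict.fromkeys, and obtain each count by scanning the pair list with list.count (no accumulator, no in-place increments).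
import Mathlib
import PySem

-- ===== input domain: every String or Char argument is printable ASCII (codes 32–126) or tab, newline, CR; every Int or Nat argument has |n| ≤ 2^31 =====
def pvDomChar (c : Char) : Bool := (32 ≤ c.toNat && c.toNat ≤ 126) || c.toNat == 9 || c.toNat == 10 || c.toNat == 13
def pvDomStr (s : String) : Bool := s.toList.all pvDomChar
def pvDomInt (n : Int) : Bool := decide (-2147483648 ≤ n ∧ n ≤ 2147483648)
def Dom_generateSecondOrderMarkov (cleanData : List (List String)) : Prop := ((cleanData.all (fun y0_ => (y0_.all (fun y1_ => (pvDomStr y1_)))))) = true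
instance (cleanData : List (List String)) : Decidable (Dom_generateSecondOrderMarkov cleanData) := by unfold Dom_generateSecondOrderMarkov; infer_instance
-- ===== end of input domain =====

-- B replaces A's incremental nested-dict mutation by a declarative comprehension
-- that counts each pair by scanning a flat pair list (objective: alternative; not faster).

-- ===== PORT A =====
-- body of A's inner loop for one adjacent pair (line[i], line[i+1])
def markovStepA (m : PySem.Dict String (PySem.Dict String Int)) (a b : String) :
    PySem.Dict String (PySem.Dict String Int) :=
  if m.contains a then
    -- 'markov_model[line[i]]' (key present, so get? is some)
    let inner := (m.get? a).getD PySem.Dict.empty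
    if inner.contains b then
      -- markov_model[line[i]][line[i+1]] += 1  (in-place update: insert keeps position)
      m.insert a (inner.insert b (inner.getD b 0 + 1))
    else
      m.insert a (inner.insert b 1)
  else
    m.insert a ((PySem.Dict.empty : PySem.Dict String Int).insert b 1)

-- 'for i in range(0, len(line) - 1)' reads exactly the pairs (line[i], line[i+1]),
-- i.e. walks the list's adjacent pairs; ported as the structural recursion over them.
def markovLineA (m : PySem.Dict String (PySem.Dict String Int)) :
    List String → PySem.Dict String (PySem.Dict String Int)
  | a :: b :: rest => markovLineA (markovStepA m a b) (b :: rest)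
  | _ => m

def generateSecondOrderMarkov (cleanData : List (List String)) :
    List (String × List (String × Int)) :=
  (cleanData.foldl markovLineA PySem.Dict.empty).items.map (fun p => (p.1, p.2.items))

-- ===== PORT B =====
def generateSecondOrderMarkov_alt (cleanData : List (List String)) :
    List (String × List (String × Int)) :=
  -- pairs = [p for line in cleanData for p in zip(line, line[1:])]  (zip = List.zip with tail)
  let pairs : List (String × String) := cleanData.flatMap (fun line => line.zip line.tail)
  -- {a: {b: pairs.count((a,b)) for b in dict.fromkeys(...)} for a in dict.fromkeys(...)}
  -- dict.fromkeys dedup in first-occurrence order = PySem.Set.ofList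
  (PySem.Set.ofList (pairs.map (fun p => p.1))).map (fun a =>
    (a, (PySem.Set.ofList ((pairs.filter (fun p => p.1 == a)).map (fun p => p.2))).map
          (fun b => (b, (pairs.count (a, b) : Int)))))

-- ===== PRECONDITION & SPEC =====
def Spec_generateSecondOrderMarkov (cleanData : List (List String)) (out : List (String × List (String × Int))) : Prop := out = generateSecondOrderMarkov_alt cleanData
instance (cleanData : List (List String)) (out : List (String × List (String × Int))) : Decidable (Spec_generateSecondOrderMarkov cleanData out) := by unfold Spec_generateSecondOrderMarkov; infer_instance

-- ===== CLAIM (what is proved, stated in full; the proofs are below) =====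
def Claim_equal_generateSecondOrderMarkov : Prop := ∀ (cleanData : List (List String)), Dom_generateSecondOrderMarkov cleanData → Spec_generateSecondOrderMarkov cleanData (generateSecondOrderMarkov cleanData)

-- ===== LEMMAS AND PROOFS =====

theorem markovLineA_eq (line : List String) (m : PySem.Dict String (PySem.Dict String Int)) :
    markovLineA m line = (line.zip line.tail).foldl (fun m p => markovStepA m p.1 p.2) m := by
  induction line generalizing m with
  | nil => rfl
  | cons a tail ih =>
    cases tail with
    | nil => rfl
    | cons b rest =>
      show markovLineA (markovStepA m a b) (b :: rest) = _
      rw [ih]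
      rfl

theorem foldA_eq (cleanData : List (List String)) (m : PySem.Dict String (PySem.Dict String Int)) :
    cleanData.foldl markovLineA m
      = (cleanData.flatMap (fun line => line.zip line.tail)).foldl
          (fun m p => markovStepA m p.1 p.2) m := by
  induction cleanData generalizing m with
  | nil => rfl
  | cons line ls ih =>
    rw [List.foldl_cons, ih, List.flatMap_cons, List.foldl_append, markovLineA_eq]

-- A's per-pair step, uncurried
def stepP (m : PySem.Dict String (PySem.Dict String Int)) (p : String × String) :
    PySem.Dict String (PySem.Dict String Int) := markovStepA m p.1 p.2

-- the inner dict A's step writes at key p.1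
def innerNextA (m : PySem.Dict String (PySem.Dict String Int)) (p : String × String) :
    PySem.Dict String Int :=
  if m.contains p.1 then
    if ((m.get? p.1).getD PySem.Dict.empty).contains p.2 then
      ((m.get? p.1).getD PySem.Dict.empty).insert p.2
        (((m.get? p.1).getD PySem.Dict.empty).getD p.2 0 + 1)
    else ((m.get? p.1).getD PySem.Dict.empty).insert p.2 1
  else (PySem.Dict.empty : PySem.Dict String Int).insert p.2 1

theorem stepP_eq_insert (m : PySem.Dict String (PySem.Dict String Int)) (p : String × String) :
    stepP m p = m.insert p.1 (innerNextA m p) := by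
  simp only [stepP, markovStepA, innerNextA]
  split_ifs <;> rfl

-- counting a pair in s = counting its snd among the pairs with the same fst
theorem count_pair_eq (a b : String) (s : List (String × String)) :
    s.count (a, b) = ((s.filter (fun p => p.1 == a)).map (fun p => p.2)).count b := by
  induction s with
  | nil => rfl
  | cons p s ih =>
    by_cases h1 : p.1 = a
    · by_cases h2 : p.2 = b
      · have hp : p = (a, b) := by cases p; simp_all
        simp [hp, ih]
      · have hne : p ≠ (a, b) := by
          intro hc; exact h2 (by rw [hc])
        simp [h1, hne, h2, ih]
    · have hne : p ≠ (a, b) := by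
        intro hc; exact h1 (by rw [hc])
      simp [h1, hne, ih]

-- ---------- A-side characterization ----------

theorem stepP_getD_self (m : PySem.Dict String (PySem.Dict String Int)) (p : String × String) :
    (stepP m p).getD p.1 PySem.Dict.empty
      = (m.getD p.1 PySem.Dict.empty).insert p.2
          ((m.getD p.1 PySem.Dict.empty).getD p.2 0 + 1) := by
  have hinner : (m.get? p.1).getD PySem.Dict.empty = m.getD p.1 PySem.Dict.empty :=
    (PySem.Dict.getD_eq_get?_getD m p.1 PySem.Dict.empty).symm
  rw [stepP_eq_insert, PySem.Dict.getD_insert_self]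
  simp only [innerNextA, hinner]
  by_cases hc : m.contains p.1
  · simp only [hc, if_true]
    by_cases hb : (m.getD p.1 PySem.Dict.empty).contains p.2
    · simp [hb]
    · have hb' : (m.getD p.1 PySem.Dict.empty).contains p.2 = false := by
        simpa using hb
      rw [if_neg hb, PySem.Dict.getD_of_not_contains _ _ hb']
      norm_num
  · have hc' : m.contains p.1 = false := by simpa using hc
    have hm : m.getD p.1 PySem.Dict.empty = PySem.Dict.empty :=
      PySem.Dict.getD_of_not_contains _ _ hc'
    rw [if_neg hc, hm]
    simp [PySem.Dict.getD_empty]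

theorem stepP_getD_ne (m : PySem.Dict String (PySem.Dict String Int)) (p : String × String)
    (a : String) (h : a ≠ p.1) :
    (stepP m p).getD a PySem.Dict.empty = m.getD a PySem.Dict.empty := by
  rw [stepP_eq_insert]
  exact PySem.Dict.getD_insert_of_ne _ _ _ h

theorem foldP_getD (s : List (String × String)) (m : PySem.Dict String (PySem.Dict String Int))
    (a : String) :
    (s.foldl stepP m).getD a PySem.Dict.empty
      = ((s.filter (fun p => p.1 == a)).map (fun p => p.2)).foldl
          (fun d b => d.insert b (d.getD b 0 + 1)) (m.getD a PySem.Dict.empty) := by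
  induction s generalizing m with
  | nil => rfl
  | cons p s ih =>
    by_cases h : p.1 = a
    · subst h
      simp only [List.foldl_cons, List.filter_cons, beq_self_eq_true, if_pos, List.map_cons]
      rw [ih, stepP_getD_self]
    · have hb : (p.1 == a) = false := beq_eq_false_iff_ne.mpr h
      simp only [List.foldl_cons, List.filter_cons, hb, Bool.false_eq_true, if_false]
      rw [ih, stepP_getD_ne m p a (Ne.symm h)]

theorem foldA_getD (s : List (String × String)) (a : String) :
    (s.foldl stepP PySem.Dict.empty).getD a PySem.Dict.empty
      = PySem.Dict.counter ((s.filter (fun p => p.1 == a)).map (fun p => p.2)) := by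
  rw [foldP_getD, ← PySem.Dict.foldl_insert_getD_add_one_eq_counter]
  simp [PySem.Dict.getD_empty]

theorem foldA_keys (s : List (String × String)) :
    (s.foldl stepP PySem.Dict.empty).keys = PySem.Set.ofList (s.map (fun p => p.1)) := by
  have hfun : stepP = fun (m : PySem.Dict String (PySem.Dict String Int))
      (p : String × String) => m.insert p.1 (innerNextA m p) := by
    funext m p; exact stepP_eq_insert m p
  rw [hfun, PySem.Dict.keys_foldl_insert_key s (fun p => p.1) innerNextA PySem.Dict.empty]
  exact PySem.Set.update_nil_left _

theorem foldA_nodup (s : List (String × String)) :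
    (s.foldl stepP PySem.Dict.empty).keys.Nodup := by
  rw [foldA_keys]; exact PySem.Set.nodup_ofList _

-- ===== VERDICT (by name: the statement is the Claim_ definition above) =====
theorem generateSecondOrderMarkov_spec : Claim_equal_generateSecondOrderMarkov := by
  intro cleanData _
  unfold Spec_generateSecondOrderMarkov generateSecondOrderMarkov generateSecondOrderMarkov_alt
  rw [foldA_eq, show (fun m (p : String × String) => markovStepA m p.1 p.2) = stepP from rfl]
  set s : List (String × String) := cleanData.flatMap (fun line => line.zip line.tail) with hs
  rw [PySem.Dict.items_eq_map_keys _ (foldA_nodup s) PySem.Dict.empty, foldA_keys,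
    List.map_map]
  apply List.map_congr_left
  intro a _
  simp only [Function.comp]
  rw [foldA_getD, PySem.Dict.items_counter]
  apply congrArg
  apply List.map_congr_left
  intro b _
  rw [count_pair_eq]
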